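-- pv_equiv track=rewrite | github.com/vanshksingh/TalkingMAC | voice/wake_word.py | _wake_phrase_position_ok
-- ===== SOURCE A (Python) =====
-- def _wake_phrase_position_ok(text_tokens: list[str], wake_tokens: list[str], strict: bool) -> bool:
--     if not text_tokens or not wake_tokens:
--         return False
--     n = len(wake_tokens)
--     for i in range(0, max(0, len(text_tokens) - n + 1)):
--         if text_tokens[i:i + n] != wake_tokens:
--             continue
--         if not strict:
--             return True
--         # Strict mode (TTS active): only accept short utterances or phrase near the beginning.
--         return len(text_tokens) <= n + 2 or i <= 1
--     return False
-- ===== SOURCE B (Python) =====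
-- def _occurs(xs, w):
--     # does w occur as a contiguous run in xs? scan candidate starts from the END down to 0
--     n = len(w)
--     for k in range(len(xs) - n, -1, -1):
--         if xs[k:k + n] == w:
--             return True
--     return False
--
--
-- def _wake_phrase_position_ok(text_tokens: list[str], wake_tokens: list[str], strict: bool) -> bool:
--     if not text_tokens or not wake_tokens:
--         return False
--     n = len(wake_tokens)
--     if not strict or len(text_tokens) <= n + 2:
--         # only existence of the phrase matters
--         return _occurs(text_tokens, wake_tokens)
--     # strict and long utterance: the phrase must start at index 0 or 1
--     return text_tokens[:n] == wake_tokens or text_tokens[1:1 + n] == wake_tokens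
-- ===== Notes on version B (the rewrite author's own statement) =====
-- stated objective: alternative
-- what changed: B replaces A's single forward index loop carrying the strict position test with a decomposition: a reverse-order scan over valid start positions for the pure existence check (non-strict or short text), and a direct prefix test at offsets 0 and 1 for the strict long-text case, exploiting that A's first-match index is <= 1 iff the phrase starts at 0 or 1.
import Mathlib
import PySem

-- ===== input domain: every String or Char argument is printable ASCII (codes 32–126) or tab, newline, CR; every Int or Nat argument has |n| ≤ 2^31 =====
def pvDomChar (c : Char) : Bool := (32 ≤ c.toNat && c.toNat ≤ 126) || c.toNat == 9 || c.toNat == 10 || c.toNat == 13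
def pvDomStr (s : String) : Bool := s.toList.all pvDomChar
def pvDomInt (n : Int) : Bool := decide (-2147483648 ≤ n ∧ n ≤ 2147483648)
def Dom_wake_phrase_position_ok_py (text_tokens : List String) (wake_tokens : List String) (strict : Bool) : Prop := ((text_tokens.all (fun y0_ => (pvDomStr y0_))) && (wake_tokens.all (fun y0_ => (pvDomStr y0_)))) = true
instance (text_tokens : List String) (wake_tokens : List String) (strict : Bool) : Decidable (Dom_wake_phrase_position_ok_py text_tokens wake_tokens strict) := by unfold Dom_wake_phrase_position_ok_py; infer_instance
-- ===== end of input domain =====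

-- B replaces A's index loop by an existence check plus a direct prefix test at offsets 0/1 in strict mode;
-- objective: alternative decomposition (same asymptotic cost).

-- ===== PORT A =====
-- the for-loop of A, over the list of indices produced by range(...)
def wakeLoopA (text wake : List String) (strict : Bool) : List Int → Bool
  | [] => false
  | i :: rest =>
    if PySem.List.slice text (some i) (some (i + (wake.length : Int))) ≠ wake then
      wakeLoopA text wake strict rest
    else if !strict then
      true
    else
      decide ((text.length : Int) ≤ (wake.length : Int) + 2) || decide (i ≤ 1)

def wake_phrase_position_ok_py (text_tokens : List String) (wake_tokens : List String) (strict : Bool) : Bool :=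
  if text_tokens = [] ∨ wake_tokens = [] then false
  else
    wakeLoopA text_tokens wake_tokens strict
      (PySem.List.pyRange 0 (max 0 ((text_tokens.length : Int) - (wake_tokens.length : Int) + 1)) 1)

-- ===== PORT B =====
-- _occurs: for k in range(len(xs) - n, -1, -1): if xs[k:k+n] == w: return True
def occursLoopB (xs w : List String) : List Int → Bool
  | [] => false
  | k :: rest =>
    if PySem.List.slice xs (some k) (some (k + (w.length : Int))) = w then true
    else occursLoopB xs w rest

def occursAlt (xs w : List String) : Bool :=
  occursLoopB xs w (PySem.List.pyRange ((xs.length : Int) - (w.length : Int)) (-1) (-1))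

def wake_phrase_position_ok_py_alt (text_tokens : List String) (wake_tokens : List String) (strict : Bool) : Bool :=
  if text_tokens = [] ∨ wake_tokens = [] then false
  else if !strict || decide (text_tokens.length ≤ wake_tokens.length + 2) then
    occursAlt text_tokens wake_tokens
  else
    (PySem.List.slice text_tokens none (some (wake_tokens.length : Int)) = wake_tokens)
    || (PySem.List.slice text_tokens (some 1) (some (1 + (wake_tokens.length : Int))) = wake_tokens)

-- ===== PRECONDITION & SPEC =====
def Spec_wake_phrase_position_ok_py (text_tokens : List String) (wake_tokens : List String) (strict : Bool) (out : Bool) : Prop := out = wake_phrase_position_ok_py_alt text_tokens wake_tokens strict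
instance (text_tokens : List String) (wake_tokens : List String) (strict : Bool) (out : Bool) : Decidable (Spec_wake_phrase_position_ok_py text_tokens wake_tokens strict out) := by unfold Spec_wake_phrase_position_ok_py; infer_instance

-- ===== CLAIM (what is proved, stated in full; the proofs are below) =====
def Claim_equal_wake_phrase_position_ok_py : Prop := ∀ (text_tokens : List String) (wake_tokens : List String) (strict : Bool), Dom_wake_phrase_position_ok_py text_tokens wake_tokens strict → Spec_wake_phrase_position_ok_py text_tokens wake_tokens strict (wake_phrase_position_ok_py text_tokens wake_tokens strict)

-- ===== LEMMAS AND PROOFS =====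

-- slices in the two ports, in drop/take form
theorem sliceA_eq (text wake : List String) (j : Nat) :
    PySem.List.slice text (some (j : Int)) (some ((j : Int) + (wake.length : Int))) =
      (text.drop j).take wake.length :=
  PySem.List.slice_natCast_add text j wake.length

-- a match starting at i fits inside text
theorem match_le (text wake : List String) (i : Int) (hw : 1 ≤ wake.length) (h0 : 0 ≤ i)
    (hm : PySem.List.slice text (some i) (some (i + (wake.length : Int))) = wake) :
    i + (wake.length : Int) ≤ (text.length : Int) := by
  have hL := congrArg List.length hm
  rw [PySem.List.slice_toNat text h0 (by omega), List.length_take, List.length_drop] at hL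
  have hi : ((i.toNat : Int)) = i := Int.toNat_of_nonneg h0
  have h2 : wake.length ≤ text.length - i.toNat := hL ▸ min_le_right _ _
  have h3 : i.toNat + wake.length ≤ text.length := by omega
  calc i + (wake.length : Int) = (i.toNat : Int) + (wake.length : Int) := by rw [hi]
    _ ≤ (text.length : Int) := by exact_mod_cast h3

-- in the existence-only cases, A's loop is an "any" over its index list
theorem loopA_any (text wake : List String) (strict : Bool)
    (hc : strict = false ∨ text.length ≤ wake.length + 2) :
    ∀ l : List Int, wakeLoopA text wake strict l =
      l.any (fun i => decide (PySem.List.slice text (some i) (some (i + (wake.length : Int))) = wake)) := by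
  intro l
  induction l with
  | nil => simp [wakeLoopA]
  | cons i rest ih =>
    unfold wakeLoopA
    by_cases hm : PySem.List.slice text (some i) (some (i + (wake.length : Int))) = wake
    · rcases hc with hc | hc
      · simp [hm, hc]
      · cases strict
        · simp [hm]
        · simp [hm]
          omega
    · simp [hm, ih]

-- B's backward scan is an "any" over its index list
theorem loopB_any (xs w : List String) :
    ∀ l : List Int, occursLoopB xs w l =
      l.any (fun k => decide (PySem.List.slice xs (some k) (some (k + (w.length : Int))) = w)) := by
  intro l
  induction l with
  | nil => simp [occursLoopB]
  | cons k rest ih =>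
    unfold occursLoopB
    by_cases hm : PySem.List.slice xs (some k) (some (k + (w.length : Int))) = w <;>
      simp [hm, ih]

-- strict long case: from index 2 on, the loop can only return false
theorem loop_tail_false (text wake : List String)
    (hlong : ¬ text.length ≤ wake.length + 2) :
    ∀ (l : List Int), (∀ i ∈ l, 2 ≤ i) → wakeLoopA text wake true l = false := by
  intro l
  induction l with
  | nil => intro _; simp [wakeLoopA]
  | cons i rest ih =>
    intro h
    unfold wakeLoopA
    split
    · exact ih (fun k hk => h k (by simp [hk]))
    · have h2 : 2 ≤ i := h i (by simp)
      simp
      constructor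
      · omega
      · omega

-- ===== VERDICT (by name: the statement is the Claim_ definition above) =====
theorem wake_phrase_position_ok_py_spec : Claim_equal_wake_phrase_position_ok_py := by
  intro text wake strict _
  unfold Spec_wake_phrase_position_ok_py wake_phrase_position_ok_py wake_phrase_position_ok_py_alt
  by_cases hbase : text = [] ∨ wake = []
  · simp [hbase]
  · push_neg at hbase
    obtain ⟨ht, hw⟩ := hbase
    have hn : 1 ≤ wake.length := List.length_pos_iff.mpr hw
    have hlen : 1 ≤ text.length := List.length_pos_iff.mpr ht
    have hbn : ¬(text = [] ∨ wake = []) := by simp [ht, hw]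
    simp only [if_neg hbn]
    by_cases hcond : (!strict || decide (text.length ≤ wake.length + 2)) = true
    · rw [if_pos hcond]
      have hc' : strict = false ∨ text.length ≤ wake.length + 2 := by
        cases strict <;> simp_all
      unfold occursAlt
      rw [loopA_any text wake strict hc', loopB_any]
      rw [Bool.eq_iff_iff]
      simp only [List.any_eq_true, decide_eq_true_eq, PySem.List.mem_pyRange_one,
        PySem.List.mem_pyRange_neg_one]
      constructor
      · rintro ⟨i, ⟨hi0, hilt⟩, hm⟩
        have hle := match_le text wake i hn hi0 hm
        exact ⟨i, ⟨by omega, by omega⟩, hm⟩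
      · rintro ⟨k, ⟨hk0, hk1⟩, hm⟩
        have h0 : (0 : Int) ≤ k := by omega
        have hle := match_le text wake k hn h0 hm
        refine ⟨k, ⟨h0, ?_⟩, hm⟩
        exact lt_max_iff.mpr (Or.inr (by omega))
    · rw [if_neg hcond]
      have hs' : strict = true := by cases strict <;> simp_all
      have hlong : ¬ text.length ≤ wake.length + 2 := by
        intro h; exact hcond (by simp [h])
      subst hs'
      have hm4 : (4 : Int) ≤ max 0 ((text.length : Int) - (wake.length : Int) + 1) :=
        le_max_of_le_right (by push_cast; omega)
      rw [PySem.List.pyRange_one_cons (by omega)]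
      rw [PySem.List.pyRange_one_cons (show (0:Int)+1 < _ by omega)]
      unfold wakeLoopA
      have e0 : PySem.List.slice text (some 0) (some (0 + (wake.length : Int))) =
          text.take wake.length := by
        have := sliceA_eq text wake 0
        simpa using this
      have e1 : PySem.List.slice text (some (0 + 1)) (some ((0 + 1) + (wake.length : Int))) =
          (text.drop 1).take wake.length := by
        have := sliceA_eq text wake 1
        simpa using this
      have e1' : PySem.List.slice text (some 1) (some (1 + (wake.length : Int))) =
          (text.drop 1).take wake.length := by
        have := sliceA_eq text wake 1
        simpa using this
      rw [e0]
      by_cases h0 : text.take wake.length = wake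
      · simp [h0, PySem.List.slice_to_natCast]
      · simp only [ne_eq, h0, not_false_eq_true, if_true]
        unfold wakeLoopA
        rw [e1]
        by_cases h1 : (text.drop 1).take wake.length = wake
        · have h1' : text.tail.take wake.length = wake := by rwa [List.drop_one] at h1
          simp [List.drop_one, h1', PySem.List.slice_to_natCast, e1', h0]
        · have h1' : ¬ text.tail.take wake.length = wake := by rwa [List.drop_one] at h1
          simp only [ne_eq, h1, not_false_eq_true, if_true]
          rw [loop_tail_false text wake hlong _
            (fun i hi => by
              have := (PySem.List.mem_pyRange_one.mp hi).1
              omega)]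
          simp [List.drop_one, PySem.List.slice_to_natCast, e1', h0, h1']
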